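-- pv_equiv track=rewrite | github.com/simonvandevannet/Informatica5 | 12b - Roosters/kleurendriehoek.py | kleuren
-- ===== SOURCE A (Python) =====
-- def kleuren(lijst):
--     somg = 0
--     somr = 0
--     somy = 0
--     for i in range(len(lijst)):
--         for j in range(len(lijst[i])):
--             if lijst[i][j] == 'G':
--                 somg += 1
--             elif lijst[i][j] == 'R':
--                 somr += 1
--             else:
--                 somy += 1
--     return somg, somr, somy
-- ===== SOURCE B (Python) =====
-- def kleuren(lijst):
--     g = sum(row.count('G') for row in lijst)
--     r = sum(row.count('R') for row in lijst)
--     total = sum(len(row) for row in lijst)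
--     return g, r, total - g - r
-- ===== Notes on version B (the rewrite author's own statement) =====
-- stated objective: simpler
-- what changed: Replaces the single indexed pass with a three-way conditional by separate list.count/len scans per row, deriving the 'other' count by subtraction.
import Mathlib
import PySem

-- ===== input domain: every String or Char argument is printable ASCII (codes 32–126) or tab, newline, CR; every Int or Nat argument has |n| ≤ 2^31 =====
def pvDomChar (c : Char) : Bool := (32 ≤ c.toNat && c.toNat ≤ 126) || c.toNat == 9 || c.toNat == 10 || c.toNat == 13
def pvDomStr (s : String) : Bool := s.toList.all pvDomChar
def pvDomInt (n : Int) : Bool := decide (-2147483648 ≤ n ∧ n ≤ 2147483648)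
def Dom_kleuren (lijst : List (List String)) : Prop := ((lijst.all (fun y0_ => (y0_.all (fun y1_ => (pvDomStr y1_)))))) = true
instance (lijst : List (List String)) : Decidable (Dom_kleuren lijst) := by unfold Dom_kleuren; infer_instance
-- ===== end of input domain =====

-- B counts per colour with separate row.count scans and derives the third count by subtraction (objective: simpler).

-- ===== PORT A =====
-- single indexed pass with a three-way conditional, accumulating (somg, somr, somy)
def kleuren (lijst : List (List String)) : Int × Int × Int :=
  (PySem.List.pyRange 0 (PySem.List.len lijst) 1).foldl (fun (s : Int × Int × Int) i =>
    (PySem.List.pyRange 0 (PySem.List.len (PySem.List.pyGetD lijst i [])) 1).foldl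
      (fun (s : Int × Int × Int) j =>
        if PySem.List.pyGetD (PySem.List.pyGetD lijst i []) j "" = "G" then (s.1 + 1, s.2.1, s.2.2)
        else if PySem.List.pyGetD (PySem.List.pyGetD lijst i []) j "" = "R" then (s.1, s.2.1 + 1, s.2.2)
        else (s.1, s.2.1, s.2.2 + 1)) s) (0, 0, 0)

-- ===== PORT B =====
def kleuren_alt (lijst : List (List String)) : Int × Int × Int :=
  let g : Int := (lijst.map (fun row => (PySem.List.count row "G" : Int))).sum
  let r : Int := (lijst.map (fun row => (PySem.List.count row "R" : Int))).sum
  let total : Int := (lijst.map (fun row => (row.length : Int))).sum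
  (g, r, total - g - r)

-- ===== PRECONDITION & SPEC =====
def Spec_kleuren (lijst : List (List String)) (out : Int × Int × Int) : Prop := out = kleuren_alt lijst
instance (lijst : List (List String)) (out : Int × Int × Int) : Decidable (Spec_kleuren lijst out) := by unfold Spec_kleuren; infer_instance

-- ===== CLAIM =====
def Claim_equal_kleuren : Prop := ∀ (lijst : List (List String)), Dom_kleuren lijst → Spec_kleuren lijst (kleuren lijst)

-- ===== LEMMAS AND PROOFS =====

-- one row of A's inner loop, from an arbitrary start state
lemma inner_row (row : List String) (s : Int × Int × Int) :
    row.foldl (fun (s : Int × Int × Int) c =>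
      if c = "G" then (s.1 + 1, s.2.1, s.2.2)
      else if c = "R" then (s.1, s.2.1 + 1, s.2.2)
      else (s.1, s.2.1, s.2.2 + 1)) s
    = (s.1 + (row.count "G" : Int), s.2.1 + (row.count "R" : Int),
       s.2.2 + ((row.length : Int) - (row.count "G" : Int) - (row.count "R" : Int))) := by
  induction row generalizing s with
  | nil => simp
  | cons c t ih =>
    simp only [List.foldl_cons, List.count_cons, List.length_cons]
    by_cases hG : c = "G"
    · subst hG
      simp_all [Prod.ext_iff]
      omega
    · by_cases hR : c = "R"
      · subst hR
        simp_all [Prod.ext_iff]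
        omega
      · simp_all [Prod.ext_iff]
        omega

-- A's whole computation from an arbitrary start state
lemma outer_loop (lijst : List (List String)) (s : Int × Int × Int) :
    lijst.foldl (fun (s : Int × Int × Int) row =>
      row.foldl (fun (s : Int × Int × Int) c =>
        if c = "G" then (s.1 + 1, s.2.1, s.2.2)
        else if c = "R" then (s.1, s.2.1 + 1, s.2.2)
        else (s.1, s.2.1, s.2.2 + 1)) s) s
    = (s.1 + (lijst.map (fun row => ((row.count "G" : Int)))).sum,
       s.2.1 + (lijst.map (fun row => ((row.count "R" : Int)))).sum,
       s.2.2 + ((lijst.map (fun row => ((row.length : Int)))).sum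
                - (lijst.map (fun row => ((row.count "G" : Int)))).sum
                - (lijst.map (fun row => ((row.count "R" : Int)))).sum)) := by
  induction lijst generalizing s with
  | nil => simp
  | cons row t ih =>
    simp only [List.foldl_cons, List.map_cons, List.sum_cons]
    rw [inner_row, ih]
    simp only [Prod.mk.injEq]
    refine ⟨by ring, by ring, by ring⟩

-- ===== VERDICT =====
theorem kleuren_spec : Claim_equal_kleuren := by
  intro lijst _
  unfold Spec_kleuren kleuren kleuren_alt
  have hin : ∀ (row : List String) (s : Int × Int × Int),
      (PySem.List.pyRange 0 (PySem.List.len row) 1).foldl (fun (s : Int × Int × Int) j =>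
        if PySem.List.pyGetD row j "" = "G" then (s.1 + 1, s.2.1, s.2.2)
        else if PySem.List.pyGetD row j "" = "R" then (s.1, s.2.1 + 1, s.2.2)
        else (s.1, s.2.1, s.2.2 + 1)) s
      = row.foldl (fun (s : Int × Int × Int) c =>
        if c = "G" then (s.1 + 1, s.2.1, s.2.2)
        else if c = "R" then (s.1, s.2.1 + 1, s.2.2)
        else (s.1, s.2.1, s.2.2 + 1)) s := by
    intro row s
    exact PySem.List.foldl_pyRange_zero_pyGetD row ""
      (fun (s : Int × Int × Int) c =>
        if c = "G" then (s.1 + 1, s.2.1, s.2.2)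
        else if c = "R" then (s.1, s.2.1 + 1, s.2.2)
        else (s.1, s.2.1, s.2.2 + 1)) s
  simp only [hin]
  rw [PySem.List.foldl_pyRange_zero_pyGetD, outer_loop]
  simp [PySem.List.count_eq]
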